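-- pv_equiv track=rewrite | github.com/Prakashmaheshwaran/indeed_bot | indeed_apply.py | generate_question_from_name
-- ===== SOURCE A (Python) =====
-- def generate_question_from_name(field_name):
--     """Generate a readable question from a field name."""
--     # Convert camelCase or snake_case to readable text
--     words = []
--     current_word = ""
--
--     for char in field_name:
--         if char.isupper() and current_word:
--             words.append(current_word.lower())
--             current_word = char.lower()
--         elif char == '_' or char == '-':
--             if current_word:
--                 words.append(current_word.lower())
--                 current_word = ""
--         else:
--             current_word += char
--
--     if current_word:
--         words.append(current_word.lower())
--
--     # Create a question from the words
--     if words: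
--         # Capitalize first word and add question mark
--         question = ' '.join(words).capitalize()
--         if not question.endswith('?'):
--             question += "?"
--         return question
--
--     return field_name  # Fallback to original name
-- ===== SOURCE B (Python) =====
-- def generate_question_from_name(field_name):
--     """Generate a readable question from a field name."""
--     # Word-at-a-time scan: skip separators, slice out each maximal word, lowercase it.
--     words = []
--     i, n = 0, len(field_name)
--     while i < n:
--         ch = field_name[i]
--         if ch == '_' or ch == '-':
--             i += 1
--             continue
--         j = i + 1
--         while j < n and not (field_name[j].isupper() or field_name[j] == '_' or field_name[j] == '-'):
--             j += 1
--         words.append(field_name[i:j].lower())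
--         i = j
--
--     if not words:
--         return field_name  # Fallback to original name
--
--     question = ' '.join(words).capitalize()
--     if not question.endswith('?'):
--         question += "?"
--     return question
-- ===== Notes on version B (the rewrite author's own statement) =====
-- stated objective: alternative
-- what changed: B replaces A's char-by-char loop with a (words, current_word) accumulator by a word-at-a-time scan that skips separators and slices out each maximal word (inner boundary scan), then applies the same join/capitalize/question-mark formatting.
import Mathlib
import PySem

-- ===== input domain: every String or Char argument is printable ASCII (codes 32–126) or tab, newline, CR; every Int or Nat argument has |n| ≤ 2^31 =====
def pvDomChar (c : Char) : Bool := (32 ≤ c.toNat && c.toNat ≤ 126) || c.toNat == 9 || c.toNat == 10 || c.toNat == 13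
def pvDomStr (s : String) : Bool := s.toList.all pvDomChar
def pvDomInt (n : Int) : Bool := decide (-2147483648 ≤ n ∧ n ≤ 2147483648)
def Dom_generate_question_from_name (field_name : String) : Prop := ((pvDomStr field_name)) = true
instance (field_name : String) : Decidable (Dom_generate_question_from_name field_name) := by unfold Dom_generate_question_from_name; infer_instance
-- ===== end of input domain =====

-- B replaces A's char-by-char accumulator loop with a word-at-a-time scan
-- (skip separators, slice out each maximal word); same return value (objective: alternative decomposition).

-- str.capitalize ported by hand (PySem has no capitalize): first char titlecased, rest lowered —
-- exact on ASCII, where titlecase = uppercase.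
def pyCapitalize : List Char → List Char
  | [] => []
  | c :: cs => PySem.Chars.upperChar c :: PySem.Chars.lower cs

-- ===== PORT A =====
-- loop body of A's 'for char in field_name' (state = (words, current_word))
def pvStepA (acc : List (List Char) × List Char) (char : Char) : List (List Char) × List Char :=
  if PySem.Chars.isupper char && !acc.2.isEmpty then
    (acc.1 ++ [PySem.Chars.lower acc.2], [PySem.Chars.lowerChar char])
  else if char == '_' || char == '-' then
    (if !acc.2.isEmpty then (acc.1 ++ [PySem.Chars.lower acc.2], ([] : List Char)) else acc)
  else (acc.1, acc.2 ++ [char])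

def generate_question_from_name (field_name : String) : String :=
  let st := field_name.toList.foldl pvStepA ([], [])
  let words := if !st.2.isEmpty then st.1 ++ [PySem.Chars.lower st.2] else st.1
  if !words.isEmpty then
    let question := pyCapitalize (PySem.Chars.join [' '] words)
    if !(PySem.Chars.endswith question ['?']) then String.ofList (question ++ ['?'])
    else String.ofList question
  else field_name

-- ===== PORT B =====
-- a word ends before an uppercase letter or a '_'/'-' separator
def pvBoundary (d : Char) : Bool := PySem.Chars.isupper d || d == '_' || d == '-'

-- B's outer while loop: skip a separator, or slice out one maximal word (the inner
-- 'while j < n' boundary scan = takeWhile/dropWhile on the rest) and continue past it.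
def pvWordsB : List Char → List (List Char)
  | [] => []
  | c :: rest =>
    if c == '_' || c == '-' then pvWordsB rest
    else
      PySem.Chars.lower (c :: rest.takeWhile (fun d => !pvBoundary d))
        :: pvWordsB (rest.dropWhile (fun d => !pvBoundary d))
  termination_by cs => cs.length
  decreasing_by
    all_goals simp only [List.length_cons]
    · omega
    · exact Nat.lt_succ_of_le (List.length_dropWhile_le _ _)

def generate_question_from_name_alt (field_name : String) : String :=
  let words := pvWordsB field_name.toList
  if !words.isEmpty then
    let question := pyCapitalize (PySem.Chars.join [' '] words)
    if !(PySem.Chars.endswith question ['?']) then String.ofList (question ++ ['?'])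
    else String.ofList question
  else field_name

-- ===== PRECONDITION & SPEC =====
def Spec_generate_question_from_name (field_name : String) (out : String) : Prop := out = generate_question_from_name_alt field_name
instance (field_name : String) (out : String) : Decidable (Spec_generate_question_from_name field_name out) := by unfold Spec_generate_question_from_name; infer_instance

-- ===== CLAIM (what is proved, stated in full; the proofs are below) =====
def Claim_equal_generate_question_from_name : Prop := ∀ (field_name : String), Dom_generate_question_from_name field_name → Spec_generate_question_from_name field_name (generate_question_from_name field_name)

-- ===== LEMMAS AND PROOFS =====

-- A's final flush of the open word
def pvFinish (st : List (List Char) × List Char) : List (List Char) :=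
  if !st.2.isEmpty then st.1 ++ [PySem.Chars.lower st.2] else st.1

-- continuation semantics of A's loop: the words still to be produced from open word `cur` and input `cs`
def pvCont : List Char → List Char → List (List Char)
  | cur, [] => if !cur.isEmpty then [PySem.Chars.lower cur] else []
  | cur, c :: cs =>
    if PySem.Chars.isupper c && !cur.isEmpty then
      PySem.Chars.lower cur :: pvCont [PySem.Chars.lowerChar c] cs
    else if c == '_' || c == '-' then
      (if !cur.isEmpty then PySem.Chars.lower cur :: pvCont [] cs else pvCont cur cs)
    else pvCont (cur ++ [c]) cs

theorem pvToNat_ofNat (n : Nat) (h : Nat.isValidChar n) : (Char.ofNat n).toNat = n := by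
  rw [Char.ofNat, dif_pos h, Char.ofNatAux]
  simp only [Char.toNat, UInt32.toNat, BitVec.toNat_ofNatLT]

theorem pvLowerChar_idem (c : Char) :
    PySem.Chars.lowerChar (PySem.Chars.lowerChar c) = PySem.Chars.lowerChar c := by
  unfold PySem.Chars.lowerChar
  by_cases h : PySem.Chars.isupper c = true
  · rw [if_pos h]
    unfold PySem.Chars.isupper at h ⊢
    simp only [Char.toNat, Bool.and_eq_true, decide_eq_true_eq, Char.le_def,
      UInt32.le_iff_toNat_le] at h ⊢
    have hA : 'A'.val.toNat = 65 := by decide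
    have hZ : 'Z'.val.toNat = 90 := by decide
    have hval : (Char.ofNat (c.val.toNat + 32)).toNat = c.val.toNat + 32 :=
      pvToNat_ofNat _ (Or.inl (by omega))
    simp only [Char.toNat] at hval
    rw [if_neg]
    intro hcon
    have h1 := hcon.1
    omega
  · rw [if_neg h, if_neg h]

theorem pvFoldA (cs : List Char) : ∀ (ws : List (List Char)) (cur : List Char),
    pvFinish (cs.foldl pvStepA (ws, cur)) = ws ++ pvCont cur cs := by
  induction cs with
  | nil =>
    intro ws cur
    rw [List.foldl_nil, pvFinish, pvCont]
    by_cases h : (!cur.isEmpty) = true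
    · rw [if_pos h, if_pos h]
    · rw [if_neg h, if_neg h, List.append_nil]
  | cons c cs ih =>
    intro ws cur
    rw [List.foldl_cons, pvCont]
    by_cases h1 : (PySem.Chars.isupper c && !cur.isEmpty) = true
    · rw [if_pos h1, show pvStepA (ws, cur) c
          = (ws ++ [PySem.Chars.lower cur], [PySem.Chars.lowerChar c]) from by
            rw [pvStepA, if_pos h1]]
      rw [ih, List.append_assoc, List.singleton_append]
    · rw [if_neg h1]
      by_cases h2 : (c == '_' || c == '-') = true
      · rw [if_pos h2]
        by_cases h3 : (!cur.isEmpty) = true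
        · rw [if_pos h3, show pvStepA (ws, cur) c
              = (ws ++ [PySem.Chars.lower cur], ([] : List Char)) from by
                rw [pvStepA, if_neg h1, if_pos h2, if_pos h3]]
          rw [ih, List.append_assoc, List.singleton_append]
        · rw [if_neg h3, show pvStepA (ws, cur) c = (ws, cur) from by
                rw [pvStepA, if_neg h1, if_pos h2, if_neg h3]]
          exact ih ws cur
      · rw [if_neg h2, show pvStepA (ws, cur) c = (ws, cur ++ [c]) from by
              rw [pvStepA, if_neg h1, if_neg h2]]
        exact ih ws (cur ++ [c])

theorem pvBoundary_false {c : Char} (hu : PySem.Chars.isupper c = false)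
    (h2 : (c == '_' || c == '-') = false) : pvBoundary c = false := by
  rw [pvBoundary, Bool.or_assoc, hu, h2, Bool.or_self]

theorem pvBoundary_of_sep {c : Char} (h2 : (c == '_' || c == '-') = true) :
    pvBoundary c = true := by
  rw [pvBoundary, Bool.or_assoc, h2, Bool.or_true]

theorem pvSep_of_upper {c : Char} (h : PySem.Chars.isupper c = true) :
    (c == '_' || c == '-') = false := by
  apply Bool.or_eq_false_iff.mpr
  constructor <;> (apply beq_eq_false_iff_ne.mpr; intro hc; subst hc; exact absurd h (by decide))

theorem pvCont_eq (cs : List Char) :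
    (pvCont [] cs = pvWordsB cs) ∧
    (∀ cur, cur ≠ [] →
      pvCont cur cs =
        (PySem.Chars.lower cur ++ PySem.Chars.lower (cs.takeWhile (fun d => !pvBoundary d)))
          :: pvWordsB (cs.dropWhile (fun d => !pvBoundary d))) := by
  induction cs with
  | nil =>
    refine ⟨by rw [pvCont, pvWordsB]; rfl, ?_⟩
    intro cur hcur
    rw [pvCont, if_pos (by simp [hcur]), List.takeWhile_nil, List.dropWhile_nil,
      pvWordsB]
    simp [PySem.Chars.lower]
  | cons c cs ih =>
    have hemp : (!(List.isEmpty (α := Char) [])) = false := rfl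
    constructor
    · rw [pvCont, Bool.and_comm, hemp, Bool.false_and, if_neg (by simp)]
      by_cases h2 : (c == '_' || c == '-') = true
      · rw [if_pos h2, if_neg (by simp), ih.1, pvWordsB, if_pos h2]
      · rw [if_neg h2, List.nil_append, ih.2 [c] (by simp), pvWordsB, if_neg h2]
        simp [PySem.Chars.lower]
    · intro cur hcur
      have hne : (!cur.isEmpty) = true := by simp [hcur]
      rw [pvCont]
      by_cases hu : PySem.Chars.isupper c = true
      · -- uppercase boundary: flush cur, open a new word with the lowered char
        have hsep := pvSep_of_upper hu
        have hb : pvBoundary c = true := by rw [pvBoundary, Bool.or_assoc, hu, Bool.true_or]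
        rw [if_pos (by rw [hu, hne]; rfl), ih.2 [PySem.Chars.lowerChar c] (by simp),
          List.takeWhile_cons, List.dropWhile_cons]
        simp only [hb, Bool.not_true, Bool.false_eq_true, if_false]
        rw [pvWordsB, if_neg (by simp [hsep])]
        simp [PySem.Chars.lower, pvLowerChar_idem]
      · have hu' : PySem.Chars.isupper c = false := by simpa using hu
        rw [if_neg (by simp [hu'])]
        by_cases h2 : (c == '_' || c == '-') = true
        · -- separator: flush cur
          have hb : pvBoundary c = true := pvBoundary_of_sep h2
          rw [if_pos h2, if_pos hne, ih.1, List.takeWhile_cons, List.dropWhile_cons]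
          simp only [hb, Bool.not_true, Bool.false_eq_true, if_false]
          rw [pvWordsB, if_pos h2]
          simp [PySem.Chars.lower]
        · -- ordinary char: extend cur
          have hb : pvBoundary c = false :=
            pvBoundary_false hu' (by simpa using h2)
          rw [if_neg h2, ih.2 (cur ++ [c]) (by simp), List.takeWhile_cons, List.dropWhile_cons]
          simp only [hb, Bool.not_false, if_true]
          simp [PySem.Chars.lower]

-- ===== VERDICT (by name: the statement is the Claim_ definition above) =====
theorem generate_question_from_name_spec : Claim_equal_generate_question_from_name := by
  intro field_name _
  unfold Spec_generate_question_from_name generate_question_from_name generate_question_from_name_alt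
  have h : (let st := field_name.toList.foldl pvStepA ([], [])
      if !st.2.isEmpty then st.1 ++ [PySem.Chars.lower st.2] else st.1)
      = pvWordsB field_name.toList := by
    have h0 := pvFoldA field_name.toList [] []
    rw [(pvCont_eq field_name.toList).1, List.nil_append] at h0
    exact h0
  simp only [h]
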